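-- pv_equiv track=rewrite | github.com/stevenhgs/code_voor_thesis | src/foil/foil.py | get_negative_examples
-- ===== SOURCE A (Python) =====
-- def get_negative_examples(positive_examples, target_relation_arity, all_objects):
--     negative_examples = set()
--
--     def dfs(current_path):
--         if len(current_path) == target_relation_arity:
--             new_candidate = tuple(current_path)
--             if new_candidate not in positive_examples:
--                 negative_examples.add(new_candidate)
--             return
--         for obj in all_objects:
--             dfs(current_path + [obj])
--
--     dfs([])
--     return negative_examples
-- ===== SOURCE B (Python) =====
-- # B: iterative level-wise expansion of the tuple space (no recursion, no helper),
-- # then one set comprehension filtering out the positives.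
-- def get_negative_examples(positive_examples, target_relation_arity, all_objects):
--     tuples = [()]
--     for _ in range(target_relation_arity):
--         tuples = [t + (obj,) for t in tuples for obj in all_objects]
--     return {t for t in tuples if t not in positive_examples}
-- ===== Notes on version B (the rewrite author's own statement) =====
-- stated objective: simpler
-- what changed: Replaced A's recursive DFS with a nested inner helper threading a growing path list by a flat iterative level-wise product (repeatedly extending a list of tuples) followed by one set comprehension that filters out the positives.
-- outside the precondition, e.g. on get_negative_examples(set(), -1, []): A returns set(), B returns {()}
import Mathlib
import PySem

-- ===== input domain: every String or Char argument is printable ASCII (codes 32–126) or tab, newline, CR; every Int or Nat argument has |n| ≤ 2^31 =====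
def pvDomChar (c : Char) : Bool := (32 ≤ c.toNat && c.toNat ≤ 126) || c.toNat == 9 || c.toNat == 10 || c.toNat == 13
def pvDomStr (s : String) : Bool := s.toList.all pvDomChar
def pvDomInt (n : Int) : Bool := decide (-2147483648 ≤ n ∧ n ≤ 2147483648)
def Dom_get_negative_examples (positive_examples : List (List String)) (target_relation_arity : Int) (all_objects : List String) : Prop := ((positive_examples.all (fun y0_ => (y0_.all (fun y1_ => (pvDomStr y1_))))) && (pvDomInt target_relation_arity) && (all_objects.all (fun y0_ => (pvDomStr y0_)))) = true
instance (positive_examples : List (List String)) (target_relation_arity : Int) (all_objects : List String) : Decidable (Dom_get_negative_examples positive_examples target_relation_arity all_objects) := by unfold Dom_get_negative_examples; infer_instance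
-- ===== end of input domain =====

-- B replaces A's recursive DFS with an iterative level-wise product plus one filtering
-- set comprehension; same result, simpler decomposition (objective: simpler).


-- ===== PORT A =====
-- A's inner dfs: recursion on the path, guarded by len(path) == arity; the Nat fuel
-- (arity - len path, maintained by the caller) only makes the recursion total and is
-- never exhausted when 0 ≤ arity.
def pvDfs (positive_examples : List (List String)) (target_relation_arity : Int)
    (all_objects : List String) (fuel : Nat) (path : List String)
    (acc : PySem.Set (List String)) : PySem.Set (List String) :=
  if (path.length : Int) = target_relation_arity then
    if !(positive_examples.contains path) then PySem.Set.add acc path else acc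
  else
    match fuel with
    | 0 => acc
    | n + 1 => all_objects.foldl (fun a obj => pvDfs positive_examples target_relation_arity all_objects n (path ++ [obj]) a) acc

def get_negative_examples (positive_examples : List (List String)) (target_relation_arity : Int) (all_objects : List String) : List (List String) :=
  pvDfs positive_examples target_relation_arity all_objects target_relation_arity.toNat [] PySem.Set.empty

-- ===== PORT B =====
-- B's loop body: one level of expansion, appending each object to each tuple so far.
def pvLevels (all_objects : List String) : Nat → List (List String)
  | 0 => [[]]
  | n + 1 => (pvLevels all_objects n).flatMap (fun t => all_objects.map (fun obj => t ++ [obj]))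

def get_negative_examples_alt (positive_examples : List (List String)) (target_relation_arity : Int) (all_objects : List String) : List (List String) :=
  PySem.Set.ofList ((pvLevels all_objects target_relation_arity.toNat).filter
    (fun t => !(positive_examples.contains t)))

-- ===== PRECONDITION & SPEC =====
-- Pre_ restricts to the natural domain 0 ≤ arity: on negative arity A recurses forever
-- (RecursionError) when all_objects is nonempty, and its empty-set return when
-- all_objects is empty is a degenerate corner no caller specifies; B returns {()} there.
def Pre_get_negative_examples (positive_examples : List (List String)) (target_relation_arity : Int) (all_objects : List String) : Prop :=
  0 ≤ target_relation_arity
instance (positive_examples : List (List String)) (target_relation_arity : Int) (all_objects : List String) : Decidable (Pre_get_negative_examples positive_examples target_relation_arity all_objects) := by unfold Pre_get_negative_examples; infer_instance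

def pvWitness_get_negative_examples : List (List String) × Int × List String :=
  ([["a"]], 1, ["a", "b"])

def Spec_get_negative_examples (positive_examples : List (List String)) (target_relation_arity : Int) (all_objects : List String) (out : List (List String)) : Prop := out = get_negative_examples_alt positive_examples target_relation_arity all_objects
instance (positive_examples : List (List String)) (target_relation_arity : Int) (all_objects : List String) (out : List (List String)) : Decidable (Spec_get_negative_examples positive_examples target_relation_arity all_objects out) := by unfold Spec_get_negative_examples; infer_instance

-- ===== CLAIM (what is proved, stated in full; the proofs are below) =====
def Claim_equal_get_negative_examples : Prop := ∀ (positive_examples : List (List String)) (target_relation_arity : Int) (all_objects : List String), Dom_get_negative_examples positive_examples target_relation_arity all_objects → Pre_get_negative_examples positive_examples target_relation_arity all_objects → Spec_get_negative_examples positive_examples target_relation_arity all_objects (get_negative_examples positive_examples target_relation_arity all_objects)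

-- ===== LEMMAS AND PROOFS =====

theorem flatMap_single {α β : Type} (l : List α) (f : α → β) :
    l.flatMap (fun x => [f x]) = l.map f := by
  induction l with
  | nil => rfl
  | cons x l ih => simp [List.flatMap_cons, ih]

-- pvLevels also satisfies the head-expansion recurrence.
theorem pvLevels_succ_head (objs : List String) (n : Nat) :
    pvLevels objs (n + 1) = objs.flatMap (fun o => (pvLevels objs n).map (fun t => o :: t)) := by
  induction n with
  | zero =>
      simp only [pvLevels, List.flatMap_cons, List.flatMap_nil, List.append_nil, List.nil_append,
        List.map_cons, List.map_nil]
      exact (flatMap_single objs (fun o => [o])).symm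
  | succ n ih =>
      conv_lhs => rw [pvLevels, ih]
      simp [pvLevels, List.flatMap_assoc, List.flatMap_map, List.map_flatMap, List.map_map, Function.comp_def]

theorem foldl_flatMap {α β γ : Type} (l : List α) (f : α → List β)
    (g : γ → β → γ) (init : γ) :
    (l.flatMap f).foldl g init = l.foldl (fun a x => (f x).foldl g a) init := by
  induction l generalizing init with
  | nil => rfl
  | cons x l ih => simp [List.flatMap_cons, List.foldl_append, ih]

theorem foldl_step_filter (pos : List (List String)) (l : List (List String))
    (acc : PySem.Set (List String)) :
    l.foldl (fun a t => if !(pos.contains t) then PySem.Set.add a t else a) acc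
      = PySem.Set.update acc (l.filter (fun t => !(pos.contains t))) := by
  induction l generalizing acc with
  | nil => rfl
  | cons t l ih =>
      by_cases h : t ∈ pos
      · simpa [h, List.filter_cons] using ih acc
      · simpa [h, List.filter_cons, PySem.Set.update_cons] using ih (PySem.Set.add acc t)

theorem pvDfs_eq_foldl (pos : List (List String)) (arity : Int) (objs : List String)
    (n : Nat) (path : List String) (acc : PySem.Set (List String))
    (h : (path.length : Int) + n = arity) :
    pvDfs pos arity objs n path acc
      = ((pvLevels objs n).map (fun t => path ++ t)).foldl
          (fun a t => if !(pos.contains t) then PySem.Set.add a t else a) acc := by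
  induction n generalizing path acc with
  | zero =>
      have hp : (path.length : Int) = arity := by omega
      simp [pvDfs, hp, pvLevels]
  | succ n ih =>
      have hp : ¬ ((path.length : Int) = arity) := by omega
      rw [pvDfs]
      simp only [hp, if_false]
      rw [pvLevels_succ_head, List.map_flatMap, foldl_flatMap]
      apply PySem.List.foldl_congr_mem
      intro a o _
      rw [ih (path ++ [o]) a (by simp; omega)]
      simp [List.map_map, Function.comp_def]

theorem get_negative_examples_eq (pos : List (List String)) (arity : Int)
    (objs : List String) (h : 0 ≤ arity) :
    get_negative_examples pos arity objs = get_negative_examples_alt pos arity objs := by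
  unfold get_negative_examples get_negative_examples_alt
  rw [pvDfs_eq_foldl pos arity objs arity.toNat [] PySem.Set.empty (by simp; omega)]
  simp only [List.nil_append, List.map_id']
  rw [foldl_step_filter]
  exact PySem.Set.update_nil_left _

-- ===== VERDICT (by name: the statement is the Claim_ definition above) =====
theorem get_negative_examples_spec : Claim_equal_get_negative_examples := by
  intro pos arity objs _ hpre
  unfold Spec_get_negative_examples
  exact get_negative_examples_eq pos arity objs hpre
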